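-- pv_equiv track=rewrite | github.com/AncauAdrian/FundamentalsOfProgramming | Homework/Week2/test.py | get_real_distinct
-- ===== SOURCE A (Python) =====
-- def get_im_part(x):
--     #return x['im']  # For dictionaries
--     return x[1]    # For tuples
--
-- def get_real_distinct(x):
--     """
--     This functions returns the longest sequence in x of numbers that are real
--     """
--     i = 1
--     start = 0
--     end = 0
--     curlen = 1
--     maxlen = 1
--
--     while i <= len(x):
--         if i == len(x):
--             if curlen > maxlen:
--                 end = i
--                 start = i - curlen
--                 maxlen = curlen
--         else:
--             if get_im_part(x[i - 1]) == 0 and get_im_part(x[i]) == 0: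
--                 curlen += 1
--             else:
--                 if curlen > maxlen:
--                     end = i
--                     start = i - curlen
--                     maxlen = curlen
--
--                 curlen = 1
--         i += 1
--
--     if maxlen == 1:
--         return None
--     else:
--         return x[start:end]
-- ===== SOURCE B (Python) =====
-- def get_im_part(x):
--     #return x['im']  # For dictionaries
--     return x[1]    # For tuples
--
-- def get_real_distinct(x):
--     """
--     This functions returns the longest sequence in x of numbers that are real
--     """
--     n = len(x)
--     runs = []
--     i = 0
--     while i < n:
--         if get_im_part(x[i]) == 0:
--             j = i + 1
--             while j < n and get_im_part(x[j]) == 0: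
--                 j += 1
--             runs.append((i, j - i))
--             i = j
--         else:
--             i += 1
--     best = (0, 1)
--     for r in runs:
--         if r[1] > best[1]:
--             best = r
--     if best[1] == 1:
--         return None
--     return x[best[0]:best[0] + best[1]]
-- ===== Notes on version B (the rewrite author's own statement) =====
-- stated objective: alternative
-- what changed: A is a single stateful while-loop tracking curlen/maxlen/start/end with a duplicated closing step; B first collects all maximal runs of real numbers as (start, length) pairs, then selects the earliest run of strictly greatest length (starting from a best length of 1) and slices it out.
import Mathlib
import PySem

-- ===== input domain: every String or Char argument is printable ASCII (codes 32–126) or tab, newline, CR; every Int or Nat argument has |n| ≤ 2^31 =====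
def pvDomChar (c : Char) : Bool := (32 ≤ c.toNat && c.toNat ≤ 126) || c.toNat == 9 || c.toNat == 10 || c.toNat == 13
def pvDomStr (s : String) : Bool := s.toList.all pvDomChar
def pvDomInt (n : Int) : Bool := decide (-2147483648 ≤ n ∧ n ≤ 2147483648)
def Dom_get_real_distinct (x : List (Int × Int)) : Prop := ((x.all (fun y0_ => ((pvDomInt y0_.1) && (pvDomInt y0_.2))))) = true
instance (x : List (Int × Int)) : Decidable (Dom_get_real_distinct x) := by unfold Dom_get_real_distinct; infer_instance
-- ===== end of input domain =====

-- B replaces A's stateful single while-loop by a run-list decomposition (collect maximal real runs,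
-- then pick the earliest longest one); same cost, different structure (objective: alternative).

-- ===== PORT A =====
def get_im_part (p : Int × Int) : Int := p.2

-- A's while-loop, step for step; i counts 1..len(x); the fuel argument only makes the
-- recursion structural (one unit per iteration; the i ≤ len(x) guard is the loop test).
-- Indices i-1 and i are in range whenever they are read, so getD is exact for Python's x[i-1], x[i].
def aLoop (x : List (Int × Int)) : Nat → Nat → Int → Int → Int → Int → Int × Int × Int × Int
  | 0, _, start, en, cl, m => (start, en, cl, m)
  | fuel+1, i, start, en, cl, m =>
    if i ≤ x.length then
      if i = x.length then
        if cl > m then aLoop x fuel (i+1) ((i : Int) - cl) (i : Int) cl cl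
        else aLoop x fuel (i+1) start en cl m
      else
        if get_im_part (x.getD (i-1) (0,0)) == 0 && get_im_part (x.getD i (0,0)) == 0 then
          aLoop x fuel (i+1) start en (cl+1) m
        else
          if cl > m then aLoop x fuel (i+1) ((i : Int) - cl) (i : Int) 1 cl
          else aLoop x fuel (i+1) start en 1 m
    else (start, en, cl, m)

def get_real_distinct (x : List (Int × Int)) : Option (List (Int × Int)) :=
  let r := aLoop x x.length 1 0 0 1 1
  if r.2.2.2 == 1 then none
  else some (PySem.List.slice x (some r.1) (some r.2.1))

-- ===== PORT B =====
-- inner while of B: first index ≥ j that is out of range or not real (fuel = structural bound)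
def runEnd (x : List (Int × Int)) : Nat → Nat → Nat
  | 0, j => j
  | fuel+1, j =>
    if j < x.length then
      if get_im_part (x.getD j (0,0)) == 0 then runEnd x fuel (j+1) else j
    else j

-- outer while of B: collect all maximal runs of real numbers as (start, length) pairs
def bRuns (x : List (Int × Int)) : Nat → Nat → List (Int × Int)
  | 0, _ => []
  | fuel+1, i =>
    if i < x.length then
      if get_im_part (x.getD i (0,0)) == 0 then
        let j := runEnd x (x.length - (i+1)) (i+1)
        ((i : Int), (j : Int) - (i : Int)) :: bRuns x fuel j
      else bRuns x fuel (i+1)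
    else []

-- B's selection pass: earliest run of strictly greatest length, starting from best length 1
def bestRun (runs : List (Int × Int)) : Int × Int :=
  runs.foldl (fun b r => if r.2 > b.2 then r else b) (0, 1)

def get_real_distinct_alt (x : List (Int × Int)) : Option (List (Int × Int)) :=
  let b := bestRun (bRuns x x.length 0)
  if b.2 == 1 then none
  else some (PySem.List.slice x (some b.1) (some (b.1 + b.2)))

-- ===== PRECONDITION & SPEC =====
def Spec_get_real_distinct (x : List (Int × Int)) (out : Option (List (Int × Int))) : Prop := out = get_real_distinct_alt x
instance (x : List (Int × Int)) (out : Option (List (Int × Int))) : Decidable (Spec_get_real_distinct x out) := by unfold Spec_get_real_distinct; infer_instance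

-- ===== CLAIM (what is proved, stated in full; the proofs are below) =====
def Claim_equal_get_real_distinct : Prop := ∀ (x : List (Int × Int)), Dom_get_real_distinct x → Spec_get_real_distinct x (get_real_distinct x)

-- ===== LEMMAS AND PROOFS =====

-- the loop states of A that agree with a best-run pair of B
def Agree (a : Int × Int × Int × Int) (b : Int × Int) : Prop :=
  a.1 = b.1 ∧ a.2.2.2 = b.2 ∧ 1 ≤ b.2 ∧ (1 < b.2 → a.2.1 = b.1 + b.2)

lemma runEnd_stop (x : List (Int × Int)) (f j : Nat) (hj : ¬ j < x.length) : runEnd x f j = j := by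
  cases f with
  | zero => rfl
  | succ f => rw [runEnd, if_neg hj]

lemma runEnd_ge (x : List (Int × Int)) : ∀ f j, j ≤ runEnd x f j := by
  intro f
  induction f with
  | zero => intro j; exact le_rfl
  | succ f ih =>
    intro j
    rw [runEnd]
    by_cases hj : j < x.length
    · rw [if_pos hj]
      by_cases h : (get_im_part (x.getD j (0,0)) == 0) = true
      · rw [if_pos h]; exact le_trans (by omega) (ih (j+1))
      · rw [if_neg h]
    · rw [if_neg hj]

lemma runEnd_le (x : List (Int × Int)) : ∀ f j, j ≤ x.length → runEnd x f j ≤ x.length := by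
  intro f
  induction f with
  | zero => intro j hj; exact hj
  | succ f ih =>
    intro j hj
    rw [runEnd]
    by_cases hlt : j < x.length
    · rw [if_pos hlt]
      by_cases h : (get_im_part (x.getD j (0,0)) == 0) = true
      · rw [if_pos h]; exact ih (j+1) (by omega)
      · rw [if_neg h]; exact hj
    · rw [if_neg hlt]; exact hj

lemma runEnd_real (x : List (Int × Int)) (j : Nat) (hj : j < x.length)
    (h : (get_im_part (x.getD j (0,0)) == 0) = true) :
    runEnd x (x.length - j) j = runEnd x (x.length - (j+1)) (j+1) := by
  rw [show x.length - j = (x.length - (j+1)) + 1 from by omega, runEnd, if_pos hj, if_pos h]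

lemma runEnd_not (x : List (Int × Int)) (j : Nat) (hj : j < x.length)
    (h : ¬ (get_im_part (x.getD j (0,0)) == 0) = true) :
    runEnd x (x.length - j) j = j := by
  rw [show x.length - j = (x.length - (j+1)) + 1 from by omega, runEnd, if_pos hj, if_neg h]

lemma bRuns_stop (x : List (Int × Int)) (f i : Nat) (hi : ¬ i < x.length) : bRuns x f i = [] := by
  cases f with
  | zero => rfl
  | succ f => rw [bRuns, if_neg hi]

lemma bRuns_fuelinv (x : List (Int × Int)) :
    ∀ f g i, x.length ≤ i + f → x.length ≤ i + g → bRuns x f i = bRuns x g i := by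
  intro f
  induction f with
  | zero =>
    intro g i hf hg
    exact (bRuns_stop x g i (by omega)).symm
  | succ f ih =>
    intro g i hf hg
    by_cases hi : i < x.length
    · cases g with
      | zero => omega
      | succ g =>
        rw [bRuns, bRuns, if_pos hi, if_pos hi]
        by_cases h : (get_im_part (x.getD i (0,0)) == 0) = true
        · rw [if_pos h, if_pos h]
          have hge := runEnd_ge x (x.length - (i+1)) (i+1)
          exact congrArg _ (ih g (runEnd x (x.length - (i+1)) (i+1)) (by omega) (by omega))
        · rw [if_neg h, if_neg h]; exact ih g (i+1) (by omega) (by omega)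
    · rw [bRuns_stop x _ i hi, bRuns_stop x _ i hi]

lemma bRuns_skip (x : List (Int × Int)) (i : Nat) (hi : i < x.length)
    (h : ¬ (get_im_part (x.getD i (0,0)) == 0) = true) :
    bRuns x (x.length - i) i = bRuns x (x.length - (i+1)) (i+1) := by
  rw [show x.length - i = (x.length - (i+1)) + 1 from by omega, bRuns, if_pos hi, if_neg h]

lemma bRuns_run (x : List (Int × Int)) (i : Nat) (hi : i < x.length)
    (h : (get_im_part (x.getD i (0,0)) == 0) = true) :
    bRuns x (x.length - i) i =
      ((i : Int), ((runEnd x (x.length - (i+1)) (i+1) : Nat) : Int) - (i : Int)) ::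
        bRuns x (x.length - runEnd x (x.length - (i+1)) (i+1)) (runEnd x (x.length - (i+1)) (i+1)) := by
  rw [show x.length - i = (x.length - (i+1)) + 1 from by omega, bRuns, if_pos hi, if_pos h]
  refine congrArg _ (bRuns_fuelinv x _ _ _ ?_ ?_)
  · have := runEnd_ge x (x.length - (i+1)) (i+1); omega
  · have := runEnd_le x (x.length - (i+1)) (i+1) (by omega); omega

lemma fold_step (b r : Int × Int) (l : List (Int × Int)) :
    List.foldl (fun b r => if r.2 > b.2 then r else b) b (r :: l) =
      List.foldl (fun b r => if r.2 > b.2 then r else b) (if r.2 > b.2 then r else b) l :=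
  List.foldl_cons ..

lemma main_comb (x : List (Int × Int)) :
    ∀ (k i : Nat) (st en m : Int), i + k = x.length + 1 → 1 ≤ i → i ≤ x.length →
      1 ≤ m → (1 < m → en = st + m) →
      (Agree (aLoop x k i st en 1 m)
         (List.foldl (fun b r => if r.2 > b.2 then r else b) (st, m)
           (bRuns x (x.length - (i-1)) (i-1)))) ∧
      (∀ s : Nat, s < i → (get_im_part (x.getD (i-1) (0,0)) == 0) = true →
        Agree (aLoop x k i st en ((i : Int) - (s : Int)) m)
          (List.foldl (fun b r => if r.2 > b.2 then r else b) (st, m)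
            (((s : Int), ((runEnd x (x.length - i) i : Nat) : Int) - (s : Int)) ::
              bRuns x (x.length - runEnd x (x.length - i) i) (runEnd x (x.length - i) i)))) := by
  intro k
  induction k with
  | zero => intro i st en m hk h1 hn hm hen; omega
  | succ k ih =>
    intro i st en m hk h1 hn hm hen
    constructor
    · -- FRESH: curlen = 1 at entry i
      rw [aLoop]
      by_cases hin : i = x.length
      · rw [if_pos hn, if_pos hin, if_neg (show ¬ ((1:Int) > m) by omega)]
        have hk0 : k = 0 := by omega
        subst hk0
        rw [show aLoop x 0 (i+1) st en 1 m = (st, en, 1, m) from rfl]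
        have hstop : ¬ i < x.length := by omega
        by_cases hr : (get_im_part (x.getD (i-1) (0,0)) == 0) = true
        · rw [bRuns_run x (i-1) (by omega) hr, show i - 1 + 1 = i from by omega,
              runEnd_stop x _ i hstop, bRuns_stop x _ i hstop, fold_step,
              if_neg (show ¬ ((i:Int) - ((i-1 : Nat):Int) > m) by omega)]
          exact ⟨rfl, rfl, hm, hen⟩
        · rw [bRuns_skip x (i-1) (by omega) hr, show i - 1 + 1 = i from by omega,
              bRuns_stop x _ i hstop]
          exact ⟨rfl, rfl, hm, hen⟩
      · have hilt : i < x.length := by omega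
        rw [if_pos hn, if_neg hin]
        by_cases hb : (get_im_part (x.getD (i-1) (0,0)) == 0 &&
                       get_im_part (x.getD i (0,0)) == 0) = true
        · rw [if_pos hb]
          have hr1 : (get_im_part (x.getD (i-1) (0,0)) == 0) = true := by
            have := hb; rw [Bool.and_eq_true] at this; exact this.1
          have hr2 : (get_im_part (x.getD i (0,0)) == 0) = true := by
            have := hb; rw [Bool.and_eq_true] at this; exact this.2
          have H := (ih (i+1) st en m (by omega) (by omega) (by omega) hm hen).2 (i-1)
              (by omega) (by rwa [show i + 1 - 1 = i from by omega])
          rw [bRuns_run x (i-1) (by omega) hr1, show i - 1 + 1 = i from by omega,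
              runEnd_real x i hilt hr2]
          rw [show ((1:Int) + 1) = ((i+1 : Nat):Int) - ((i-1 : Nat):Int) from by omega]
          exact H
        · rw [if_neg hb, if_neg (show ¬ ((1:Int) > m) by omega)]
          have HF := (ih (i+1) st en m (by omega) (by omega) (by omega) hm hen).1
          rw [show i + 1 - 1 = i from by omega] at HF
          by_cases hr1 : (get_im_part (x.getD (i-1) (0,0)) == 0) = true
          · have hr2 : ¬ (get_im_part (x.getD i (0,0)) == 0) = true := by
              intro hr2; exact hb (by rw [Bool.and_eq_true]; exact ⟨hr1, hr2⟩)
            rw [bRuns_run x (i-1) (by omega) hr1, show i - 1 + 1 = i from by omega,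
                runEnd_not x i hilt hr2, fold_step,
                if_neg (show ¬ ((i:Int) - ((i-1 : Nat):Int) > m) by omega)]
            exact HF
          · rw [bRuns_skip x (i-1) (by omega) hr1, show i - 1 + 1 = i from by omega]
            exact HF
    · -- RUN: inside a maximal real run that started at index s; curlen = i - s
      intro s hs hsreal
      rw [aLoop]
      by_cases hin : i = x.length
      · have hstop : ¬ i < x.length := by omega
        rw [if_pos hn, if_pos hin, runEnd_stop x _ i hstop, bRuns_stop x _ i hstop, fold_step]
        have hk0 : k = 0 := by omega
        subst hk0
        by_cases hclm : (i:Int) - (s:Int) > m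
        · rw [if_pos hclm,
              show aLoop x 0 (i+1) ((i:Int) - ((i:Int) - (s:Int))) (i:Int) ((i:Int) - (s:Int)) ((i:Int) - (s:Int)) =
                   (((i:Int) - ((i:Int) - (s:Int))), (i:Int), ((i:Int) - (s:Int)), ((i:Int) - (s:Int))) from rfl,
              if_pos hclm, List.foldl_nil]
          refine ⟨?_, ?_, ?_, fun _ => ?_⟩ <;> dsimp only <;> omega
        · rw [if_neg hclm,
              show aLoop x 0 (i+1) st en ((i:Int) - (s:Int)) m = (st, en, ((i:Int) - (s:Int)), m) from rfl,
              if_neg hclm, List.foldl_nil]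
          exact ⟨rfl, rfl, hm, hen⟩
      · have hilt : i < x.length := by omega
        rw [if_pos hn, if_neg hin]
        by_cases hr2 : (get_im_part (x.getD i (0,0)) == 0) = true
        · rw [if_pos (show (get_im_part (x.getD (i-1) (0,0)) == 0 &&
                            get_im_part (x.getD i (0,0)) == 0) = true by
                rw [Bool.and_eq_true]; exact ⟨hsreal, hr2⟩)]
          have H := (ih (i+1) st en m (by omega) (by omega) (by omega) hm hen).2 s
              (by omega) (by rwa [show i + 1 - 1 = i from by omega])
          rw [runEnd_real x i hilt hr2,
              show ((i:Int) - (s:Int) + 1) = ((i+1 : Nat):Int) - ((s : Nat):Int) from by omega]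
          exact H
        · rw [if_neg (show ¬ (get_im_part (x.getD (i-1) (0,0)) == 0 &&
                              get_im_part (x.getD i (0,0)) == 0) = true from fun hb =>
                hr2 (by rw [Bool.and_eq_true] at hb; exact hb.2)),
              runEnd_not x i hilt hr2, fold_step]
          by_cases hclm : (i:Int) - (s:Int) > m
          · rw [if_pos hclm, if_pos hclm,
                show (i:Int) - ((i:Int) - (s:Int)) = (s:Int) from by ring]
            have HF := (ih (i+1) (s:Int) (i:Int) ((i:Int) - (s:Int)) (by omega) (by omega)
                (by omega) (by omega) (fun _ => by omega)).1
            rw [show i + 1 - 1 = i from by omega] at HF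
            exact HF
          · rw [if_neg hclm, if_neg hclm]
            have HF := (ih (i+1) st en m (by omega) (by omega) (by omega) hm hen).1
            rw [show i + 1 - 1 = i from by omega] at HF
            exact HF

theorem equal_aux (x : List (Int × Int)) : get_real_distinct x = get_real_distinct_alt x := by
  unfold get_real_distinct get_real_distinct_alt bestRun
  show (if ((aLoop x x.length 1 0 0 1 1).2.2.2 == 1) = true then none
        else some (PySem.List.slice x (some (aLoop x x.length 1 0 0 1 1).1)
                    (some (aLoop x x.length 1 0 0 1 1).2.1)))
     = (if ((List.foldl (fun b r => if r.2 > b.2 then r else b) ((0:Int), (1:Int)) (bRuns x x.length 0)).2 == 1) = true then none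
        else some (PySem.List.slice x
          (some (List.foldl (fun b r => if r.2 > b.2 then r else b) ((0:Int), (1:Int)) (bRuns x x.length 0)).1)
          (some ((List.foldl (fun b r => if r.2 > b.2 then r else b) ((0:Int), (1:Int)) (bRuns x x.length 0)).1 +
                 (List.foldl (fun b r => if r.2 > b.2 then r else b) ((0:Int), (1:Int)) (bRuns x x.length 0)).2))))
  by_cases hx : x.length = 0
  · rw [hx]
    rfl
  · have H := (main_comb x x.length 1 0 0 1 (by omega) le_rfl (by omega) le_rfl (by omega)).1
    rw [show (1:Nat) - 1 = 0 from rfl, Nat.sub_zero] at H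
    obtain ⟨h1, h2, h3, h4⟩ := H
    set a := aLoop x x.length 1 0 0 1 1 with ha
    set b := List.foldl (fun b r => if r.2 > b.2 then r else b) ((0:Int), (1:Int)) (bRuns x x.length 0) with hb
    rw [h2]
    by_cases hone : b.2 = 1
    · rw [if_pos (by simp [hone]), if_pos (by simp [hone])]
    · rw [if_neg (by simp [hone]), if_neg (by simp [hone]), h1, h4 (by omega)]

-- ===== VERDICT (by name: the statement is the Claim_ definition above) =====
theorem get_real_distinct_spec : Claim_equal_get_real_distinct := by
  intro x _
  unfold Spec_get_real_distinct
  exact equal_aux x
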